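-- pv_equiv track=rewrite | github.com/mariamota05/Multi-Agent-Decentralized-Intrusion-Detection-and-Cyber-Defense-System | new/environment.py | build_router_topology
-- ===== SOURCE A (Python) =====
-- from typing import List, Dict, Tuple, Optional
--
-- def build_router_topology(num_routers: int, topology: str) -> Dict[int, List[int]]:
--     """Build router-to-router connectivity graph."""
--     connections = {i: [] for i in range(num_routers)}
--
--     if topology == "ring":
--         for i in range(num_routers):
--             connections[i].append((i + 1) % num_routers)
--             connections[i].append((i - 1) % num_routers)
--     elif topology == "mesh":
--         for i in range(num_routers):
--             for j in range(num_routers):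
--                 if i != j:
--                     connections[i].append(j)
--     elif topology == "star":
--         # Router 0 is the hub
--         for i in range(1, num_routers):
--             connections[0].append(i)
--             connections[i].append(0)
--     elif topology == "line":
--         for i in range(num_routers - 1):
--             connections[i].append(i + 1)
--             connections[i + 1].append(i)
--     else:
--         raise ValueError(f"Unknown topology: {topology}")
--
--     # Remove duplicates and sort
--     for i in connections:
--         connections[i] = sorted(list(set(connections[i])))
--
--     return connections
-- ===== SOURCE B (Python) =====
-- def build_router_topology(num_routers: int, topology: str):
--     """Build router-to-router connectivity graph: each node's neighbour list is
--     computed directly by a closed-form per-node formula (no edge insertion, no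
--     set-dedup pass)."""
--     n = num_routers
--     if topology == "ring":
--         def nbrs(i):
--             if n == 1:
--                 return [0]
--             if n == 2:
--                 return [1 - i]
--             return sorted([(i - 1) % n, (i + 1) % n])
--     elif topology == "mesh":
--         def nbrs(i):
--             return list(range(i)) + list(range(i + 1, n))
--     elif topology == "star":
--         def nbrs(i):
--             return list(range(1, n)) if i == 0 else [0]
--     elif topology == "line":
--         def nbrs(i):
--             return [j for j in (i - 1, i + 1) if 0 <= j < n]
--     else:
--         raise ValueError(f"Unknown topology: {topology}")
--     return {i: nbrs(i) for i in range(n)}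
-- ===== Notes on version B (the rewrite author's own statement) =====
-- stated objective: alternative
-- what changed: B computes each node's neighbour list directly from a closed-form per-node formula (arithmetic on i and n per topology), eliminating A's edge-append loops, mutable adjacency dict and sorted(set()) dedup pass entirely.
import Mathlib
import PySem

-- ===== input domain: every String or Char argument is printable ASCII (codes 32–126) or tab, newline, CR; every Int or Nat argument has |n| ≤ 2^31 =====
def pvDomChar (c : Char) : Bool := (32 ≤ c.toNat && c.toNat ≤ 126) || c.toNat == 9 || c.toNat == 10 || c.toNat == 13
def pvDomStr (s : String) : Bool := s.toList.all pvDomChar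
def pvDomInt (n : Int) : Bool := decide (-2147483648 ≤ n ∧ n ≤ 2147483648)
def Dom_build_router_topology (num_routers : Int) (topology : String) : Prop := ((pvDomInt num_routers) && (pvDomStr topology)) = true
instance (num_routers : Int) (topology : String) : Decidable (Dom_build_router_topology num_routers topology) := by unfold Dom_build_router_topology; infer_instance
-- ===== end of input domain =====

-- B computes each node's neighbour list directly by a closed-form per-node formula,
-- with no edge insertion and no set-dedup pass (objective: alternative).

-- ===== PORT A =====
def build_router_topology (num_routers : Int) (topology : String) : List (Int × List Int) :=
  let conn0 : PySem.Dict Int (List Int) :=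
    (PySem.List.pyRange 0 num_routers).foldl (fun d i => d.insert i []) PySem.Dict.empty
  let conn? : Option (PySem.Dict Int (List Int)) :=
    if topology = "ring" then
      some ((PySem.List.pyRange 0 num_routers).foldl
        (fun d i =>
          (d.modify i [] (fun l => l ++ [PySem.Int.mod (i + 1) num_routers])).modify i []
            (fun l => l ++ [PySem.Int.mod (i - 1) num_routers])) conn0)
    else if topology = "mesh" then
      some ((PySem.List.pyRange 0 num_routers).foldl
        (fun d i =>
          (PySem.List.pyRange 0 num_routers).foldl
            (fun d j => if i ≠ j then d.modify i [] (fun l => l ++ [j]) else d) d) conn0)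
    else if topology = "star" then
      some ((PySem.List.pyRange 1 num_routers).foldl
        (fun d i => (d.modify 0 [] (fun l => l ++ [i])).modify i [] (fun l => l ++ [(0 : Int)])) conn0)
    else if topology = "line" then
      some ((PySem.List.pyRange 0 (num_routers - 1)).foldl
        (fun d i => (d.modify i [] (fun l => l ++ [i + 1])).modify (i + 1) [] (fun l => l ++ [i])) conn0)
    else none  -- raise ValueError: excluded by Pre_
  match conn? with
  | none => []
  | some conn =>
      (conn.keys.foldl
        (fun d i => d.modify i [] (fun l => PySem.List.sorted (PySem.Set.ofList l) (fun x => x)))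
        conn).items

-- ===== PORT B =====
-- per-node closed-form neighbour list; none = raise ValueError (excluded by Pre_)
def build_router_topology_alt (num_routers : Int) (topology : String) : List (Int × List Int) :=
  let n := num_routers
  let nbrs? : Option (Int → List Int) :=
    if topology = "ring" then
      some (fun i =>
        if n = 1 then [0]
        else if n = 2 then [1 - i]
        else PySem.List.sorted [PySem.Int.mod (i - 1) n, PySem.Int.mod (i + 1) n] (fun x => x))
    else if topology = "mesh" then
      some (fun i => PySem.List.pyRange 0 i ++ PySem.List.pyRange (i + 1) n)
    else if topology = "star" then
      some (fun i => if i = 0 then PySem.List.pyRange 1 n else [0])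
    else if topology = "line" then
      some (fun i => ([i - 1, i + 1].filter (fun j => decide (0 ≤ j ∧ j < n))))
    else none
  match nbrs? with
  | none => []
  | some nbrs => (PySem.List.pyRange 0 n).map (fun i => (i, nbrs i))

-- ===== PRECONDITION & SPEC =====
-- Pre_ excludes exactly the unknown topology names, on which A raises ValueError (B raises too).
def Pre_build_router_topology (num_routers : Int) (topology : String) : Prop :=
  topology = "ring" ∨ topology = "mesh" ∨ topology = "star" ∨ topology = "line"
instance (num_routers : Int) (topology : String) : Decidable (Pre_build_router_topology num_routers topology) := by unfold Pre_build_router_topology; infer_instance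
def pvWitness_build_router_topology : Int × String := (3, "ring")

def Spec_build_router_topology (num_routers : Int) (topology : String) (out : List (Int × List Int)) : Prop := out = build_router_topology_alt num_routers topology
instance (num_routers : Int) (topology : String) (out : List (Int × List Int)) : Decidable (Spec_build_router_topology num_routers topology out) := by unfold Spec_build_router_topology; infer_instance

-- ===== CLAIM (what is proved, stated in full; the proofs are below) =====
def Claim_equal_build_router_topology : Prop := ∀ (num_routers : Int) (topology : String), Dom_build_router_topology num_routers topology → Pre_build_router_topology num_routers topology → Spec_build_router_topology num_routers topology (build_router_topology num_routers topology)

-- ===== LEMMAS AND PROOFS =====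

-- the flattened "append v to d[k]" operation stream of A
def pvOpsA (n : Int) (t : String) : List (Int × Int) :=
  if t = "ring" then
    (PySem.List.pyRange 0 n).flatMap
      (fun i => [(i, PySem.Int.mod (i + 1) n), (i, PySem.Int.mod (i - 1) n)])
  else if t = "mesh" then
    (PySem.List.pyRange 0 n).flatMap
      (fun i => ((PySem.List.pyRange 0 n).filter (fun j => i ≠ j)).map (fun j => (i, j)))
  else if t = "star" then
    (PySem.List.pyRange 1 n).flatMap (fun i => [((0 : Int), i), (i, (0 : Int))])
  else if t = "line" then
    (PySem.List.pyRange 0 (n - 1)).flatMap (fun i => [(i, i + 1), (i + 1, i)])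
  else []

def pvVals (ops : List (Int × Int)) (i : Int) : List Int :=
  (ops.filter (fun p => p.1 == i)).map (fun p => p.2)

lemma nodup_pvR (a n : Int) : (PySem.List.pyRange a n).Nodup := by
  unfold PySem.List.pyRange
  simp only [if_neg (by norm_num : ¬ (1:Int) = 0)]
  exact List.Nodup.map (fun x y h => by exact_mod_cast (by omega : (x:Int) = y)) List.nodup_range

lemma getD_init_nil : ∀ (l : List Int) (d : PySem.Dict Int (List Int)),
    (∀ c, d.getD c [] = []) →
    ∀ c, (l.foldl (fun d i => d.insert i ([] : List Int)) d).getD c [] = [] := by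
  intro l
  induction l with
  | nil => intro d h c; exact h c
  | cons a t ih =>
      intro d h c
      refine ih _ (fun c' => ?_) c
      rw [PySem.Dict.getD_insert]
      split <;> simp [h]

lemma getD_foldl_modify_const (f : List Int → List Int) :
    ∀ (ks : List Int), ks.Nodup → ∀ (d : PySem.Dict Int (List Int)) (c : Int),
    (ks.foldl (fun d i => d.modify i [] f) d).getD c [] =
      if c ∈ ks then f (d.getD c []) else d.getD c [] := by
  intro ks
  induction ks with
  | nil => simp
  | cons a t ih =>
      intro hnd d c
      have ha : a ∉ t := (List.nodup_cons.mp hnd).1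
      simp only [List.foldl_cons]
      rw [ih (List.nodup_cons.mp hnd).2 _ c, PySem.Dict.getD_modify]
      by_cases h1 : c ∈ t <;> by_cases h2 : c = a <;> simp_all

lemma set_update_of_subset (s : PySem.Set Int) (xs : List Int) (h : ∀ x ∈ xs, x ∈ s) :
    PySem.Set.update s xs = s := by
  rw [PySem.Set.update_eq_append_filter]
  have hf : (PySem.Set.ofList xs).filter (fun y => !s.contains y) = [] := by
    rw [List.filter_eq_nil_iff]
    intro y hy
    have hm : y ∈ s := h y ((PySem.Set.mem_ofList xs y).mp hy)
    simpa using hm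
  rw [hf, List.append_nil]

lemma sorted_ofList_congr (xs ys : List Int) (h : ∀ x, x ∈ xs ↔ x ∈ ys) :
    PySem.List.sorted (PySem.Set.ofList xs) (fun x => x) =
      PySem.List.sorted (PySem.Set.ofList ys) (fun x => x) := by
  refine (PySem.List.sorted_eq_of_perm_of_pairwise_lt _ _ _ ?_ (PySem.List.sorted_ofList_pairwise_lt xs)).symm
  refine (PySem.List.sorted_perm _ _ _).trans ?_
  exact (List.perm_ext_iff_of_nodup (PySem.Set.nodup_ofList xs) (PySem.Set.nodup_ofList ys)).mpr
    (fun a => by rw [PySem.Set.mem_ofList, PySem.Set.mem_ofList]; exact h a)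

-- sorted(set(xs)) named by any strictly increasing list with the same members
lemma sorted_ofList_eq (xs l : List Int) (hlt : l.Pairwise (· < ·))
    (hmem : ∀ x, x ∈ xs ↔ x ∈ l) :
    PySem.List.sorted (PySem.Set.ofList xs) (fun x => x) = l := by
  refine PySem.List.sorted_eq_of_perm_of_pairwise_lt _ _ _ ?_ hlt
  refine (List.perm_ext_iff_of_nodup (hlt.imp (fun h => ne_of_lt h)) (PySem.Set.nodup_ofList xs)).mpr ?_
  intro a
  rw [PySem.Set.mem_ofList]
  exact (hmem a).symm

lemma dict_pipeline (n : Int) (ops : List (Int × Int))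
    (hops : ∀ p ∈ ops, p.1 ∈ PySem.List.pyRange 0 n) :
    (let conn0 : PySem.Dict Int (List Int) :=
       (PySem.List.pyRange 0 n).foldl (fun d i => d.insert i []) PySem.Dict.empty
     let conn1 := ops.foldl (fun d p => d.modify p.1 [] (fun l => l ++ [p.2])) conn0
     (conn1.keys.foldl
       (fun d i => d.modify i [] (fun l => PySem.List.sorted (PySem.Set.ofList l) (fun x => x)))
       conn1).items)
    = (PySem.List.pyRange 0 n).map
        (fun i => (i, PySem.List.sorted (PySem.Set.ofList (pvVals ops i)) (fun x => x))) := by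
  dsimp only
  set R := PySem.List.pyRange 0 n with hR
  set conn0 : PySem.Dict Int (List Int) := R.foldl (fun d i => d.insert i []) PySem.Dict.empty with hc0
  set conn1 := ops.foldl (fun d p => d.modify p.1 [] (fun l => l ++ [p.2])) conn0 with hc1
  have h0items : conn0.items = R.map (fun i => (i, ([] : List Int))) := by
    have := PySem.Dict.items_foldl_insert_fresh R (fun i => i) (fun _ => ([] : List Int))
      PySem.Dict.empty (fun a _ => PySem.Dict.contains_empty a) (by simpa using nodup_pvR 0 n)
    simpa using this
  have hkeys0 : conn0.keys = R := by
    simp only [PySem.Dict.keys, h0items, List.map_map]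
    simp [Function.comp_def]
  have hget0 : ∀ c, conn0.getD c [] = [] :=
    getD_init_nil R PySem.Dict.empty (fun c => by simp)
  have hget1 : ∀ c, conn1.getD c [] = pvVals ops c := fun c => by
    rw [hc1, PySem.Dict.getD_foldl_modify_append, hget0]; simp [pvVals]
  have hkeys1 : conn1.keys = R := by
    rw [hc1, PySem.Dict.keys_foldl_modify_key ops (fun p => p.1) [] (fun _ p => fun l => l ++ [p.2]) conn0,
      hkeys0]
    exact set_update_of_subset _ _ (by
      intro x hx; rcases List.mem_map.mp hx with ⟨p, hp, rfl⟩; exact hops p hp)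
  have hnd1 : conn1.keys.Nodup := hkeys1 ▸ nodup_pvR 0 n
  set f : List Int → List Int := fun l => PySem.List.sorted (PySem.Set.ofList l) (fun x => x) with hf
  set d2 := conn1.keys.foldl (fun d i => d.modify i [] f) conn1 with hd2
  have hkeys2 : d2.keys = R := by
    rw [hd2, PySem.Dict.keys_foldl_modify conn1.keys [] (fun _ _ => f) conn1, hkeys1]
    exact set_update_of_subset R R (fun x h => h)
  have hget2 : ∀ c, d2.getD c [] = if c ∈ R then f (conn1.getD c []) else conn1.getD c [] :=
    fun c => by rw [hd2, getD_foldl_modify_const f conn1.keys hnd1 conn1 c, hkeys1]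
  rw [PySem.Dict.items_eq_map_keys d2 (hkeys2 ▸ nodup_pvR 0 n) [], hkeys2]
  refine List.map_congr_left (fun i hi => ?_)
  rw [hget2 i, if_pos hi, hget1 i]

lemma mem_fst_opsA (n : Int) (t : String)
    (ht : t = "ring" ∨ t = "mesh" ∨ t = "star" ∨ t = "line") :
    ∀ p ∈ pvOpsA n t, p.1 ∈ PySem.List.pyRange 0 n := by
  rcases ht with rfl | rfl | rfl | rfl <;>
    · intro p hp
      simp only [pvOpsA, reduceIte, String.reduceEq, List.mem_flatMap, List.mem_map,
        List.mem_filter, PySem.List.mem_pyRange_one, List.mem_cons,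
        List.not_mem_nil, or_false] at hp ⊢
      first
        | (rcases hp with ⟨i, hi, h1 | h2⟩ <;> subst_vars <;> simp_all <;> omega)
        | (rcases hp with ⟨i, hi, j, hj, rfl⟩; simp_all)

lemma A_eq (n : Int) (t : String) (ht : t = "ring" ∨ t = "mesh" ∨ t = "star" ∨ t = "line") :
    build_router_topology n t =
      (PySem.List.pyRange 0 n).map
        (fun i => (i, PySem.List.sorted (PySem.Set.ofList (pvVals (pvOpsA n t) i)) (fun x => x))) := by
  have key := dict_pipeline n (pvOpsA n t) (mem_fst_opsA n t ht)
  dsimp only at key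
  rcases ht with rfl | rfl | rfl | rfl
  · rw [← key]
    unfold build_router_topology
    simp only [reduceIte, pvOpsA, List.foldl_flatMap]
    rfl
  · rw [← key]
    unfold build_router_topology
    simp only [reduceIte, String.reduceEq, pvOpsA, List.foldl_flatMap, List.foldl_map,
      List.foldl_filter, decide_eq_true_eq]
  · rw [← key]
    unfold build_router_topology
    simp only [reduceIte, String.reduceEq, pvOpsA, List.foldl_flatMap]
    rfl
  · rw [← key]
    unfold build_router_topology
    simp only [reduceIte, String.reduceEq, pvOpsA, List.foldl_flatMap]
    rfl

lemma ring_emod_succ (n j : Int) (h0 : 0 ≤ j) (h1 : j < n) :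
    (j + 1) % n = if j + 1 = n then 0 else j + 1 := by
  split_ifs with h
  · rw [h, Int.emod_self]
  · exact Int.emod_eq_of_lt (by omega) (by omega)

lemma ring_emod_pred (n i : Int) (h0 : 0 ≤ i) (h1 : i < n) :
    (i - 1) % n = if i = 0 then n - 1 else i - 1 := by
  split_ifs with h
  · subst h
    have h2 : ((0 : Int) - 1) % n = (-1 + n * 1) % n := by
      rw [Int.add_mul_emod_self_left]; norm_num
    rw [h2]
    have : (-1 + n * 1 : Int) = n - 1 := by ring
    rw [this, Int.emod_eq_of_lt (by omega) (by omega)]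
  · exact Int.emod_eq_of_lt (by omega) (by omega)

-- membership in A's value stream at node i, ring case
lemma vals_ring_mem (n i x : Int) :
    x ∈ pvVals (pvOpsA n "ring") i ↔
      (i ∈ PySem.List.pyRange 0 n ∧ (x = PySem.Int.mod (i + 1) n ∨ x = PySem.Int.mod (i - 1) n)) := by
  simp only [pvVals, pvOpsA, reduceIte, List.mem_map, List.mem_filter, List.mem_flatMap,
    List.mem_cons, List.not_mem_nil, or_false, beq_iff_eq, Prod.exists, Prod.mk.injEq]
  constructor
  · rintro ⟨a, b, ⟨⟨a1, ha1, ⟨h1, h2⟩ | ⟨h1, h2⟩⟩, h3⟩, rfl⟩ <;> subst_vars <;>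
      exact ⟨ha1, by simp⟩
  · rintro ⟨hi, rfl | rfl⟩
    · exact ⟨i, _, ⟨⟨i, hi, Or.inl ⟨rfl, rfl⟩⟩, rfl⟩, rfl⟩
    · exact ⟨i, _, ⟨⟨i, hi, Or.inr ⟨rfl, rfl⟩⟩, rfl⟩, rfl⟩

-- ===== VERDICT =====
theorem build_router_topology_spec : Claim_equal_build_router_topology := by
  intro n t _ ht
  unfold Spec_build_router_topology
  rw [A_eq n t ht]
  rcases ht with rfl | rfl | rfl | rfl
  · -- ring
    unfold build_router_topology_alt
    simp only [reduceIte]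
    refine List.map_congr_left (fun i hi => ?_)
    refine congrArg (Prod.mk i) ?_
    have hi' := (PySem.List.mem_pyRange_one).mp hi
    have hn : 0 < n := by omega
    by_cases h1 : n = 1
    · subst h1
      simp only [reduceIte]
      refine sorted_ofList_eq _ _ (by simp) (fun x => ?_)
      rw [vals_ring_mem]
      have : i = 0 := by omega
      subst this
      simp only [PySem.Int.mod_eq_emod_of_pos hn, List.mem_singleton]
      constructor
      · rintro ⟨_, rfl | rfl⟩ <;> decide
      · rintro rfl
        exact ⟨hi, Or.inl (by decide)⟩
    · by_cases h2 : n = 2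
      · subst h2
        simp only [if_neg h1, reduceIte]
        refine sorted_ofList_eq _ _ (by simp) (fun x => ?_)
        rw [vals_ring_mem]
        simp only [PySem.Int.mod_eq_emod_of_pos hn, List.mem_singleton]
        rw [ring_emod_succ 2 i hi'.1 hi'.2, ring_emod_pred 2 i hi'.1 hi'.2]
        constructor
        · rintro ⟨_, rfl | rfl⟩ <;> split_ifs <;> omega
        · rintro rfl
          exact ⟨hi, by split_ifs <;> omega⟩
      · -- n ≥ 3
        simp only [if_neg h1, if_neg h2]
        have hne : PySem.Int.mod (i - 1) n ≠ PySem.Int.mod (i + 1) n := by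
          simp only [PySem.Int.mod_eq_emod_of_pos hn]
          rw [ring_emod_succ n i hi'.1 hi'.2, ring_emod_pred n i hi'.1 hi'.2]
          split_ifs <;> omega
        have hof : PySem.Set.ofList [PySem.Int.mod (i - 1) n, PySem.Int.mod (i + 1) n]
            = [PySem.Int.mod (i - 1) n, PySem.Int.mod (i + 1) n] :=
          PySem.Set.ofList_eq_self_of_nodup _ (by simp [hne])
        calc PySem.List.sorted (PySem.Set.ofList (pvVals (pvOpsA n "ring") i)) (fun x => x)
            = PySem.List.sorted
                (PySem.Set.ofList [PySem.Int.mod (i - 1) n, PySem.Int.mod (i + 1) n]) (fun x => x) := by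
              refine sorted_ofList_congr _ _ (fun x => ?_)
              rw [vals_ring_mem]
              simp only [List.mem_cons, List.not_mem_nil, or_false]
              tauto
          _ = PySem.List.sorted [PySem.Int.mod (i - 1) n, PySem.Int.mod (i + 1) n] (fun x => x) := by
              rw [hof]
  · -- mesh
    unfold build_router_topology_alt
    simp only [reduceIte, String.reduceEq]
    refine List.map_congr_left (fun i hi => ?_)
    refine congrArg (Prod.mk i) ?_
    have hi' := (PySem.List.mem_pyRange_one).mp hi
    refine sorted_ofList_eq _ _ ?_ (fun x => ?_)
    · refine List.pairwise_append.mpr ⟨PySem.List.pairwise_lt_pyRange_one 0 i,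
        PySem.List.pairwise_lt_pyRange_one (i+1) n, ?_⟩
      intro a ha b hb
      rw [PySem.List.mem_pyRange_one] at ha hb
      omega
    · simp only [pvVals, pvOpsA, reduceIte, String.reduceEq, List.mem_map, List.mem_filter,
        List.mem_flatMap, beq_iff_eq, Prod.exists, Prod.mk.injEq, List.mem_append,
        PySem.List.mem_pyRange_one, decide_eq_true_eq]
      constructor
      · rintro ⟨a, b, ⟨⟨a1, ha1, j, ⟨hj, hne⟩, rfl, rfl⟩, rfl⟩, rfl⟩
        omega
      · intro hx
        exact ⟨i, x, ⟨⟨i, hi', x, ⟨⟨by omega, by omega⟩, by omega⟩, rfl, rfl⟩, rfl⟩, rfl⟩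
  · -- star
    unfold build_router_topology_alt
    simp only [reduceIte, String.reduceEq]
    refine List.map_congr_left (fun i hi => ?_)
    refine congrArg (Prod.mk i) ?_
    have hi' := (PySem.List.mem_pyRange_one).mp hi
    by_cases h0 : i = 0
    · subst h0
      simp only [reduceIte]
      refine sorted_ofList_eq _ _ (PySem.List.pairwise_lt_pyRange_one 1 n) (fun x => ?_)
      simp only [pvVals, pvOpsA, reduceIte, String.reduceEq, List.mem_map, List.mem_filter,
        List.mem_flatMap, List.mem_cons, List.not_mem_nil, or_false, beq_iff_eq,
        Prod.exists, Prod.mk.injEq, PySem.List.mem_pyRange_one]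
      constructor
      · rintro ⟨a, b, ⟨⟨a1, ha1, ⟨h1, h2⟩ | ⟨h1, h2⟩⟩, h3⟩, rfl⟩ <;> subst_vars <;> omega
      · intro hx
        exact ⟨0, x, ⟨⟨x, hx, Or.inl ⟨rfl, rfl⟩⟩, rfl⟩, rfl⟩
    · simp only [if_neg h0]
      refine sorted_ofList_eq _ _ (by simp) (fun x => ?_)
      simp only [pvVals, pvOpsA, reduceIte, String.reduceEq, List.mem_map, List.mem_filter,
        List.mem_flatMap, List.mem_cons, List.not_mem_nil, or_false, beq_iff_eq,
        Prod.exists, Prod.mk.injEq, PySem.List.mem_pyRange_one]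
      constructor
      · rintro ⟨a, b, ⟨⟨a1, ha1, ⟨h1, h2⟩ | ⟨h1, h2⟩⟩, h3⟩, rfl⟩ <;> subst_vars <;> omega
      · rintro rfl
        exact ⟨i, 0, ⟨⟨i, ⟨by omega, by omega⟩, Or.inr ⟨rfl, rfl⟩⟩, rfl⟩, rfl⟩
  · -- line
    unfold build_router_topology_alt
    simp only [reduceIte, String.reduceEq]
    refine List.map_congr_left (fun i hi => ?_)
    refine congrArg (Prod.mk i) ?_
    have hi' := (PySem.List.mem_pyRange_one).mp hi
    refine sorted_ofList_eq _ _ ?_ (fun x => ?_)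
    · exact List.Pairwise.filter _ (by simp)
    · simp only [pvVals, pvOpsA, reduceIte, String.reduceEq, List.mem_map, List.mem_filter,
        List.mem_flatMap, List.mem_cons, List.not_mem_nil, or_false, beq_iff_eq,
        Prod.exists, Prod.mk.injEq, PySem.List.mem_pyRange_one, decide_eq_true_eq]
      constructor
      · rintro ⟨a, b, ⟨⟨a1, ha1, ⟨h1, h2⟩ | ⟨h1, h2⟩⟩, h3⟩, rfl⟩ <;> subst_vars <;>
          exact ⟨by omega, by omega⟩
      · rintro ⟨rfl | rfl, hx⟩
        · exact ⟨i, i - 1, ⟨⟨i - 1, ⟨by omega, by omega⟩, Or.inr ⟨by omega, rfl⟩⟩, rfl⟩, rfl⟩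
        · exact ⟨i, i + 1, ⟨⟨i, ⟨by omega, by omega⟩, Or.inl ⟨rfl, rfl⟩⟩, rfl⟩, rfl⟩
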